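-- pv_equiv track=rewrite | github.com/parttimehacker/structurehub | monitor/views.py | overall_level
-- ===== SOURCE A (Python) =====
-- from typing import Any, Dict, List, Optional, Tuple
--
-- def overall_level(levels: List[str]) -> str:
--     """
--     Combine multiple low/med/high/unknown into one.
--     """
--     if "high" in levels:
--         return "high"
--     if "med" in levels:
--         return "med"
--     if all(l == "unknown" for l in levels):
--         return "unknown"
--     return "low"
-- ===== SOURCE B (Python) =====
-- def overall_level(levels):
--     """
--     Combine multiple low/med/high/unknown into one.
--     """
--     rank = {"high": 3, "med": 2, "unknown": 0}
--     m = max((rank.get(l, 1) for l in levels), default=0)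
--     return ("unknown", "low", "med", "high")[m]
-- ===== Notes on version B (the rewrite author's own statement) =====
-- stated objective: idiomatic
-- what changed: Replaced the three sequential membership/all scans with a single pass computing the maximum numeric severity rank (high=3, med=2, other=1, unknown=0, default 0 for empty), then decoding the rank back to a level name.
import Mathlib
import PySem

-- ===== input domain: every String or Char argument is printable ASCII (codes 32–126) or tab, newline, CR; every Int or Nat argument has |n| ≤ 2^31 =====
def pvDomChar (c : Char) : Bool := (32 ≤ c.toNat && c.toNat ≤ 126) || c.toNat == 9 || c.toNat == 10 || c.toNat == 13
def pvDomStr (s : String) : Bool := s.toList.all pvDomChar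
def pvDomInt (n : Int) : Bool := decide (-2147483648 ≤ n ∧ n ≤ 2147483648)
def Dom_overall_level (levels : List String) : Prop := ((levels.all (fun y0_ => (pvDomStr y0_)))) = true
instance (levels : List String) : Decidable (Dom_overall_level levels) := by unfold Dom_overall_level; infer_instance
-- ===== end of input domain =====

-- B replaces A's three sequential scans by one pass taking the max severity rank; objective: idiomatic single pass.

-- ===== PORT A =====
def overall_level (levels : List String) : String :=
  if levels.contains "high" then "high"
  else if levels.contains "med" then "med"
  else if levels.all (fun l => l == "unknown") then "unknown"
  else "low"

-- ===== PORT B =====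
-- rank.get(l, 1) with rank = {"high": 3, "med": 2, "unknown": 0}
def pvRank (s : String) : Nat :=
  if s == "high" then 3 else if s == "med" then 2 else if s == "unknown" then 0 else 1

def overall_level_alt (levels : List String) : String :=
  let m := levels.foldl (fun a s => Nat.max a (pvRank s)) 0
  -- ("unknown", "low", "med", "high")[m]
  if m == 3 then "high" else if m == 2 then "med" else if m == 1 then "low" else "unknown"

-- ===== PRECONDITION & SPEC =====
def Spec_overall_level (levels : List String) (out : String) : Prop := out = overall_level_alt levels
instance (levels : List String) (out : String) : Decidable (Spec_overall_level levels out) := by unfold Spec_overall_level; infer_instance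

-- ===== CLAIM (what is proved, stated in full; the proofs are below) =====
def Claim_equal_overall_level : Prop := ∀ (levels : List String), Dom_overall_level levels → Spec_overall_level levels (overall_level levels)

-- ===== LEMMAS AND PROOFS =====
theorem pv_le_foldl (l : List String) (a : Nat) :
    a ≤ l.foldl (fun a s => Nat.max a (pvRank s)) a := by
  induction l generalizing a with
  | nil => simp
  | cons x xs ih =>
      simp only [List.foldl_cons]
      exact le_trans (Nat.le_max_left _ _) (ih _)

theorem pv_rank_le_foldl (l : List String) (a : Nat) (s : String) (h : s ∈ l) :
    pvRank s ≤ l.foldl (fun a s => Nat.max a (pvRank s)) a := by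
  induction l generalizing a with
  | nil => cases h
  | cons x xs ih =>
      simp only [List.foldl_cons]
      rcases List.mem_cons.mp h with h | h
      · subst h
        exact le_trans (Nat.le_max_right _ _) (pv_le_foldl _ _)
      · exact ih _ h

theorem pv_foldl_le (l : List String) (a b : Nat) (ha : a ≤ b)
    (hl : ∀ s ∈ l, pvRank s ≤ b) :
    l.foldl (fun a s => Nat.max a (pvRank s)) a ≤ b := by
  induction l generalizing a with
  | nil => simpa
  | cons x xs ih =>
      simp only [List.foldl_cons]
      exact ih _ (Nat.max_le.mpr ⟨ha, hl x (List.mem_cons_self)⟩)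
        (fun s hs => hl s (List.mem_cons_of_mem _ hs))

-- ===== VERDICT (by name: the statement is the Claim_ definition above) =====
theorem overall_level_spec : Claim_equal_overall_level := by
  intro levels _
  unfold Spec_overall_level overall_level overall_level_alt
  set m := levels.foldl (fun a s => Nat.max a (pvRank s)) 0 with hm
  by_cases hh : levels.contains "high"
  · have hmem : "high" ∈ levels := by simpa using hh
    have h3 : 3 ≤ m := by
      rw [hm]
      calc (3:ℕ) = pvRank "high" := by decide
        _ ≤ _ := pv_rank_le_foldl levels 0 "high" hmem
    have h3' : m ≤ 3 := pv_foldl_le levels 0 3 (by norm_num)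
      (fun s _ => by unfold pvRank; split_ifs <;> norm_num)
    have : m = 3 := le_antisymm h3' h3
    simp [hmem, this]
  · have hnh : "high" ∉ levels := by simpa using hh
    by_cases hmd : levels.contains "med"
    · have hmem : "med" ∈ levels := by simpa using hmd
      have h2 : 2 ≤ m := by
        rw [hm]
        calc (2:ℕ) = pvRank "med" := by decide
          _ ≤ _ := pv_rank_le_foldl levels 0 "med" hmem
      have h2' : m ≤ 2 := pv_foldl_le levels 0 2 (by norm_num)
        (fun s hs => by
          unfold pvRank
          split_ifs with h1 <;> try norm_num
          exact absurd (eq_of_beq h1 ▸ hs) hnh)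
      have : m = 2 := le_antisymm h2' h2
      simp [hnh, hmem, this]
    · have hnm : "med" ∉ levels := by simpa using hmd
      by_cases hu : levels.all (fun l => l == "unknown")
      · have hall : ∀ s ∈ levels, s = "unknown" := by
          intro s hs
          have := List.all_eq_true.mp hu s hs
          simpa using this
        have h0 : m = 0 := Nat.le_zero.mp (pv_foldl_le levels 0 0 le_rfl
          (fun s hs => by simp [hall s hs, pvRank]))
        simp [hnh, hnm, h0]
        exact hall
      · have : ∃ s ∈ levels, s ≠ "unknown" := by
          by_contra hc
          push_neg at hc
          exact hu (List.all_eq_true.mpr (fun s hs => by simp [hc s hs]))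
        obtain ⟨s, hs, hsu⟩ := this
        have hsh : s ≠ "high" := fun h => hnh (h ▸ hs)
        have hsm : s ≠ "med" := fun h => hnm (h ▸ hs)
        have h1 : 1 ≤ m := by
          rw [hm]
          calc (1:ℕ) = pvRank s := by simp [pvRank, hsh, hsm, hsu]
            _ ≤ _ := pv_rank_le_foldl levels 0 s hs
        have h1' : m ≤ 1 := pv_foldl_le levels 0 1 (by norm_num)
          (fun t ht => by
            unfold pvRank
            split_ifs with ha hb <;> try norm_num
            · exact absurd (eq_of_beq ha ▸ ht) hnh
            · exact absurd (eq_of_beq hb ▸ ht) hnm)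
        have hnall : ¬ ∀ x ∈ levels, x = "unknown" := fun hc => hsu (hc s hs)
        have : m = 1 := le_antisymm h1' h1
        simp [hnh, hnm, hnall, this]
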